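-- pv_equiv track=rewrite | github.com/kongtaehun/CodingTestPrac | BAEKJOON/기출,실전대비/종훈문제모음/(구현)17140-이차원배열과연산.py | sortF
-- ===== SOURCE A (Python) =====
-- def sortF(lis):
--     nums = [[i, 0] for i in range(101)]
--     for i in range(len(lis)):
--         if lis[i] != 0:
--             nums[lis[i]][1] += 1
--     nums.sort(key=lambda x: (x[1], x[0]))
--     result = []
--     for i in range(1, 101):
--         if nums[i][1] != 0:
--             result.append(nums[i][0])
--             result.append(nums[i][1])
--     return result
-- ===== SOURCE B (Python) =====
-- def sortF(lis):
--     # counting-sort-style grouping: count into the 101-slot table, then emit, for each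
--     # occurring frequency in ascending order, the values having it in ascending order
--     cnt = [0] * 101
--     for v in lis:
--         if v != 0:
--             cnt[v] += 1
--     result = []
--     for c in sorted(set(cnt)):
--         if c:
--             for v in range(101):
--                 if cnt[v] == c:
--                     result.append(v)
--                     result.append(c)
--     return result
-- ===== Notes on version B (the rewrite author's own statement) =====
-- stated objective: alternative
-- what changed: B keeps the 101-slot indexed counting but replaces A's comparison sort of the whole 101-row table by counting-sort-style grouping: it sorts only the distinct occurring counts and, for each nonzero count in ascending order, emits the values holding it in ascending slot order.
-- intended difference: On lists whose nonzero values occupy all 101 counting slots (every k in 0..100 hit by some v = k or v = k - 101), A's emission scan over sorted positions 1..100 of the 101-row table silently drops the row with the smallest (frequency, value), while B reports every occupied slot; B's complete frequency listing is the intended value. — e.g. on sortF([1, 2, 3, 4, 5, 6, 7, 8, 9, 10, 11, 12, 13, 14, 15, 16, 17, 18, 19, 20, 21, 22, 23, 24, 25, 26, 27, 28, 29, 30, 31, 32,…): A returns [1, 1, 2, 1, 3, 1, 4, 1, 5, 1, 6, 1, 7, 1, 8, 1, 9, 1, 10, 1, 11, 1, 12, 1, 13, 1, 14, 1, 15, 1,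 16, 1, 17, 1, 18, 1, 1…, B returns [0, 1, 1, 1, 2, 1, 3, 1, 4, 1, 5, 1, 6, 1, 7, 1, 8, 1, 9, 1, 10, 1, 11, 1, 12, 1, 13, 1, 14, 1, 15, 1, 16, 1, 17, 1, 18…
import Mathlib
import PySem

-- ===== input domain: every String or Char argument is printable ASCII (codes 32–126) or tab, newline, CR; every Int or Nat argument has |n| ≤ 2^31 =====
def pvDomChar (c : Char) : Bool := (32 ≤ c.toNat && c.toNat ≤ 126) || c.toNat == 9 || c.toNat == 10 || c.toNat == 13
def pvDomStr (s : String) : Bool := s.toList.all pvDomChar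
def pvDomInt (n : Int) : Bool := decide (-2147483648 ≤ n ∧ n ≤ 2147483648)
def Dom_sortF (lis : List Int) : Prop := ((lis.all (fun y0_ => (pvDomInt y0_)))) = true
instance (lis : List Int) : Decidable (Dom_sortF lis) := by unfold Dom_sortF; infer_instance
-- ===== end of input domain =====

-- B replaces A's comparison sort of the 101-row table by counting-sort-style grouping
-- (ascending occurring frequencies, values ascending within each); same 101-slot counting.
-- On lists whose nonzero values occupy all 101 slots, A drops one row (see D_ below); B reports it.


-- ===== PORT A =====
-- body of A's counting loop: `if lis[i] != 0: nums[lis[i]][1] += 1` (x is lis[i])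
def aCount (nums : List (Int × Int)) (x : Int) : List (Int × Int) :=
  if x ≠ 0 then
    PySem.List.pySetD nums x
      ((PySem.List.pyGetD nums x (0, 0)).1, (PySem.List.pyGetD nums x (0, 0)).2 + 1)
  else nums

-- body of A's result loop: `if nums[i][1] != 0: result.append(nums[i][0]); result.append(nums[i][1])`
def aEmit (result : List Int) (row : Int × Int) : List Int :=
  if row.2 ≠ 0 then result ++ [row.1, row.2] else result

def sortF (lis : List Int) : List Int :=
  let nums0 := (PySem.List.pyRange 0 101).map (fun i => (i, (0 : Int)))
  let nums1 := (PySem.List.pyRange 0 (lis.length : Int)).foldl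
    (fun nums i => aCount nums (PySem.List.pyGetD lis i 0)) nums0
  let nums2 := PySem.List.sorted2 nums1 (fun x => x.2) (fun x => x.1)
  (PySem.List.pyRange 1 101).foldl
    (fun result i => aEmit result (PySem.List.pyGetD nums2 i (0, 0))) []

-- ===== PORT B =====
-- body of B's counting loop: `if v != 0: cnt[v] += 1`
def bCount (cnt : List Int) (v : Int) : List Int :=
  if v ≠ 0 then PySem.List.pySetD cnt v (PySem.List.pyGetD cnt v 0 + 1) else cnt

def sortF_alt (lis : List Int) : List Int :=
  let cnt := lis.foldl bCount (List.replicate 101 (0 : Int))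
  -- for c in sorted(set(cnt)): if c: for v in range(101): if cnt[v] == c: append v, c
  (PySem.List.sorted (PySem.Set.ofList cnt) (fun c => c)).foldl
    (fun result c =>
      if c ≠ 0 then
        (PySem.List.pyRange 0 101).foldl
          (fun r v => if PySem.List.pyGetD cnt v 0 == c then r ++ [v, c] else r) result
      else result) []

-- ===== PRECONDITION & SPEC =====
-- exactly the inputs where A returns: a value outside -101 ≤ v ≤ 100 raises IndexError in `nums[lis[i]]`
def Pre_sortF (lis : List Int) : Prop := ∀ v ∈ lis, -101 ≤ v ∧ v ≤ 100
instance (lis : List Int) : Decidable (Pre_sortF lis) := by unfold Pre_sortF; infer_instance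
def pvWitness_sortF : List Int := [1, 2, 2, -1, 100, -101]

-- On lists whose nonzero values occupy all 101 counting slots (every k in 0..100 is hit by some
-- v = k or v = k - 101), A's emission scan over sorted positions 1..100 of the 101-row table silently
-- drops the row with the smallest (frequency, value); B reports every occupied slot, which is the
-- intended complete frequency listing.
def D_sortF (lis : List Int) : Prop :=
  ∀ k ∈ List.range 101, ∃ v ∈ lis, v ≠ 0 ∧ (v = (k : Int) ∨ v = (k : Int) - 101)
instance (lis : List Int) : Decidable (D_sortF lis) := by unfold D_sortF; infer_instance

def Spec_sortF (lis : List Int) (out : List Int) : Prop := ¬ D_sortF lis → out = sortF_alt lis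
instance (lis : List Int) (out : List Int) : Decidable (Spec_sortF lis out) := by unfold Spec_sortF; infer_instance

def pvDiffWitness_sortF : List Int := [1, 2, 3, 4, 5, 6, 7, 8, 9, 10, 11, 12, 13, 14, 15, 16, 17, 18, 19, 20, 21, 22, 23, 24, 25, 26, 27, 28, 29, 30, 31, 32, 33, 34, 35, 36, 37, 38, 39, 40, 41, 42, 43, 44, 45, 46, 47, 48, 49, 50, 51, 52, 53, 54, 55, 56, 57, 58, 59, 60, 61, 62, 63, 64, 65, 66, 67, 68, 69, 70, 71, 72, 73, 74, 75, 76, 77, 78, 79, 80, 81, 82, 83, 84, 85, 86, 87, 88, 89, 90, 91, 92, 93, 94, 95, 96, 97, 98, 99, 100, -101]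
def pvDiffWitnessOut_sortF : (List Int) × (List Int) := ([1, 1, 2, 1, 3, 1, 4, 1, 5, 1, 6, 1, 7, 1, 8, 1, 9, 1, 10, 1, 11, 1, 12, 1, 13, 1, 14, 1, 15, 1, 16, 1, 17, 1, 18, 1, 19, 1, 20, 1, 21, 1, 22, 1, 23, 1, 24, 1, 25, 1, 26, 1, 27, 1, 28, 1, 29, 1, 30, 1, 31, 1, 32, 1, 33, 1, 34, 1, 35, 1, 36, 1, 37, 1, 38, 1, 39, 1, 40, 1, 41, 1, 42, 1, 43, 1, 44, 1, 45, 1, 46, 1, 47, 1, 48, 1, 49, 1, 50, 1, 51, 1, 52, 1, 53, 1, 54, 1, 55, 1, 56, 1, 57, 1, 58, 1, 59, 1, 60, 1, 61, 1, 62, 1, 63, 1, 64, 1, 65, 1, 66, 1, 67, 1, 68, 1, 69, 1, 70, 1, 71, 1, 72, 1, 73, 1, 74, 1, 75, 1, 76, 1, 77, 1, 78, 1, 79, 1, 80, 1, 81, 1, 82, 1, 83, 1, 84, 1, 85, 1, 86, 1, 87, 1, 88, 1, 89, 1, 90, 1, 91, 1, 92, 1, 93, 1, 94, 1, 95, 1,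 96, 1, 97, 1, 98, 1, 99, 1, 100, 1], [0, 1, 1, 1, 2, 1, 3, 1, 4, 1, 5, 1, 6, 1, 7, 1, 8, 1, 9, 1, 10, 1, 11, 1, 12, 1, 13, 1, 14, 1, 15, 1, 16, 1, 17, 1, 18, 1, 19, 1, 20, 1, 21, 1, 22, 1, 23, 1, 24, 1, 25, 1, 26, 1, 27, 1, 28, 1, 29, 1, 30, 1, 31, 1, 32, 1, 33, 1, 34, 1, 35, 1, 36, 1, 37, 1, 38, 1, 39, 1, 40, 1, 41, 1, 42, 1, 43, 1, 44, 1, 45, 1, 46, 1, 47, 1, 48, 1, 49, 1, 50, 1, 51, 1, 52, 1, 53, 1, 54, 1, 55, 1, 56, 1, 57, 1, 58, 1, 59, 1, 60, 1, 61, 1, 62, 1, 63, 1, 64, 1, 65, 1, 66, 1, 67, 1, 68, 1, 69, 1, 70, 1, 71, 1, 72, 1, 73, 1, 74, 1, 75, 1, 76, 1, 77, 1, 78, 1, 79, 1, 80, 1, 81, 1, 82, 1, 83, 1, 84, 1, 85, 1, 86, 1, 87, 1, 88, 1, 89, 1, 90, 1, 91, 1, 92, 1, 93, 1, 94, 1,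 95, 1, 96, 1, 97, 1, 98, 1, 99, 1, 100, 1])

-- ===== CLAIM (what is proved, stated in full; the proofs are below) =====
def Claim_unchanged_sortF : Prop := ∀ (lis : List Int), Dom_sortF lis → Pre_sortF lis → Spec_sortF lis (sortF lis)
def Claim_changed_sortF : Prop := Dom_sortF (pvDiffWitness_sortF) ∧ Pre_sortF (pvDiffWitness_sortF) ∧ D_sortF (pvDiffWitness_sortF) ∧ sortF (pvDiffWitness_sortF) = pvDiffWitnessOut_sortF.1 ∧ sortF_alt (pvDiffWitness_sortF) = pvDiffWitnessOut_sortF.2 ∧ pvDiffWitnessOut_sortF.1 ≠ pvDiffWitnessOut_sortF.2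
def Claim_exact_sortF : Prop := ∀ (lis : List Int), Dom_sortF lis → Pre_sortF lis → D_sortF lis → sortF lis ≠ sortF_alt lis

-- ===== LEMMAS AND PROOFS =====


-- the Python index nums[v] resolves to, for a table of length 101
def idx101 (v : Int) : Nat := (if v < 0 then v + 101 else v).toNat

-- A's 101-row table as a function of the count list
def NTab (c : List Int) : List (Int × Int) := (List.range 101).map (fun (i : Nat) => ((i : Int), c.getD i 0))

def keyLex (x : Int × Int) : Int ×ₗ Int := toLex (x.2, x.1)

-- the sorted table, grouped by distinct counts ascending, values ascending within a count
def orderC (cnt : List Int) : List (Int × Int) :=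
  (PySem.List.sorted (PySem.Set.ofList cnt) (fun c => c)).flatMap
    (fun c => ((List.range 101).filter (fun (i : Nat) => cnt.getD i 0 == c)).map (fun (i : Nat) => ((i : Int), c)))

def cntArr (lis : List Int) : List Int := lis.foldl bCount (List.replicate 101 (0 : Int))
-- the values of lis mapped to the slot they are counted in
def wys (lis : List Int) : List Int :=
  (lis.filter (fun v => !(v == 0))).map (fun v => if v < 0 then v + 101 else v)
def blockF (lis : List Int) (c : Int) : List Nat :=
  (List.range 101).filter (fun i => (cntArr lis).getD i 0 == c)
def blockP (lis : List Int) (c : Int) : List (Int × Int) :=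
  (blockF lis c).map (fun (i : Nat) => ((i : Int), c))
def csA (lis : List Int) : List Int := PySem.List.sorted (PySem.Set.ofList (cntArr lis)) (fun c => c)

lemma pyIdx_101 (v : Int) (h1 : -101 ≤ v) (h2 : v ≤ 100) :
    PySem.List.pyIdx? 101 v = some (idx101 v) := by
  simp only [PySem.List.pyIdx?, idx101]
  split_ifs <;> first | (exfalso; omega) | rfl | (simp only [Option.some.injEq]; omega)

lemma idx101_lt (v : Int) (h1 : -101 ≤ v) (h2 : v ≤ 100) : idx101 v < 101 := by
  unfold idx101; split <;> omega

lemma pyGetD_in {α : Type} (xs : List α) (hl : xs.length = 101) (v : Int)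
    (h1 : -101 ≤ v) (h2 : v ≤ 100) (d : α) :
    PySem.List.pyGetD xs v d = xs.getD (idx101 v) d := by
  simp [PySem.List.pyGetD, PySem.List.pyGet?, hl, pyIdx_101 v h1 h2, List.getD_eq_getElem?_getD]

lemma pySetD_in {α : Type} (xs : List α) (hl : xs.length = 101) (v : Int)
    (h1 : -101 ≤ v) (h2 : v ≤ 100) (x : α) :
    PySem.List.pySetD xs v x = xs.set (idx101 v) x := by
  simp [PySem.List.pySetD, PySem.List.pySet?, hl, pyIdx_101 v h1 h2]

lemma bCount_len (c : List Int) (v : Int) : (bCount c v).length = c.length := by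
  unfold bCount; split <;> simp [PySem.List.length_pySetD]

lemma foldl_bCount_len (lis : List Int) (c : List Int) : (lis.foldl bCount c).length = c.length := by
  induction lis generalizing c with
  | nil => rfl
  | cons v t ih => simp [List.foldl_cons, ih, bCount_len]

lemma NTab_getD (c : List Int) (k : Nat) (hk : k < 101) :
    (NTab c).getD k ((0 : Int), (0 : Int)) = ((k : Int), c.getD k 0) := by
  rw [List.getD_eq_getElem _ _ (by simp [NTab]; omega)]
  simp [NTab]

lemma aCount_N (c : List Int) (hl : c.length = 101) (v : Int)
    (h1 : -101 ≤ v) (h2 : v ≤ 100) : aCount (NTab c) v = NTab (bCount c v) := by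
  by_cases hv : v = 0
  · simp [aCount, bCount, hv]
  · have hk := idx101_lt v h1 h2
    have hNlen : (NTab c).length = 101 := by simp [NTab]
    unfold aCount bCount
    rw [if_pos hv, if_pos hv]
    rw [pyGetD_in _ hNlen v h1 h2, pySetD_in _ hNlen v h1 h2,
        pyGetD_in c hl v h1 h2, pySetD_in c hl v h1 h2]
    rw [NTab_getD c (idx101 v) hk]
    set k := idx101 v with hkdef
    apply List.ext_getElem
    · simp [NTab]
    · intro j hj1 hj2
      simp only [NTab, List.length_map, List.length_range] at hj2 ⊢
      rw [List.getElem_set]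
      simp only [List.getElem_map, List.getElem_range]
      by_cases hkj : k = j
      · subst hkj
        have hc1 : k < c.length := by omega
        simp [hc1]
      · simp only [if_neg hkj]
        congr 1
        rw [List.getD_eq_getElem _ _ (by simpa [hl] using hj2),
            List.getD_eq_getElem _ _ (by simp [hl]; omega)]
        simp [hkj]

lemma count_fold (lis : List Int) (hpre : Pre_sortF lis) :
    ∀ c : List Int, c.length = 101 →
      lis.foldl aCount (NTab c) = NTab (lis.foldl bCount c) := by
  induction lis with
  | nil => intro c _; rfl
  | cons v t ih =>
      intro c hc
      have hv := hpre v (by simp)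
      simp only [List.foldl_cons, aCount_N c hc v hv.1 hv.2]
      exact ih (fun w hw => hpre w (by simp [hw])) _ (by simp [bCount_len, hc])

lemma NTab_init : (PySem.List.pyRange 0 101).map (fun i => (i, (0 : Int)))
    = NTab (List.replicate 101 (0 : Int)) := by
  rw [show (101 : Int) = ((101 : Nat) : Int) by norm_num, PySem.List.pyRange_zero_nat]
  simp only [NTab, List.map_map]
  apply List.map_congr_left
  intro i hi
  rw [List.getD_eq_getElem _ _ (by simpa using List.mem_range.mp hi)]
  rw [List.getElem_replicate]
  rfl

lemma partition_perm {α : Type} (g : α → Int) :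
    ∀ (cs : List Int) (ys : List α), cs.Nodup → (∀ y ∈ ys, g y ∈ cs) →
      (cs.flatMap (fun c => ys.filter (fun y => g y == c))).Perm ys := by
  intro cs
  induction cs with
  | nil =>
      intro ys _ hmem
      have : ys = [] := by
        cases ys with
        | nil => rfl
        | cons a t => exact absurd (hmem a (by simp)) (by simp)
      simp [this]
  | cons c cs ih =>
      intro ys hnd hmem
      rw [List.flatMap_cons]
      have hcs : ∀ c' ∈ cs, ys.filter (fun y => g y == c')
          = (ys.filter (fun y => !(g y == c))).filter (fun y => g y == c') := by
        intro c' hc'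
        rw [List.filter_filter]
        apply List.filter_congr
        intro y _
        have hne : c' ≠ c := by rintro rfl; exact (List.nodup_cons.mp hnd).1 hc'
        by_cases h : g y = c' <;> simp [h, hne]
      have hflat : cs.flatMap (fun c' => ys.filter (fun y => g y == c'))
          = cs.flatMap (fun c' => (ys.filter (fun y => !(g y == c))).filter (fun y => g y == c')) := by
        rw [List.flatMap_def, List.flatMap_def, List.map_congr_left hcs]
      rw [hflat]
      have hperm := ih (ys.filter (fun y => !(g y == c))) (List.nodup_cons.mp hnd).2 (by
        intro y hy
        have h1 := List.mem_filter.mp hy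
        have h2 := hmem y h1.1
        simp only [List.mem_cons] at h2
        rcases h2 with h2 | h2
        · exfalso; simpa [h2] using h1.2
        · exact h2)
      exact ((hperm.append_left _).trans (List.filter_append_perm _ ys))

lemma orderC_perm (cnt : List Int) (hl : cnt.length = 101) :
    (orderC cnt).Perm (NTab cnt) := by
  have hblock : ∀ c : Int, ((List.range 101).filter (fun (i : Nat) => cnt.getD i 0 == c)).map (fun (i : Nat) => ((i : Int), c))
      = (NTab cnt).filter (fun p => p.2 == c) := by
    intro c
    rw [NTab, List.filter_map]
    apply List.map_congr_left
    intro i hi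
    have := (List.mem_filter.mp hi).2
    have h : cnt.getD i 0 = c := eq_of_beq this
    simp [← h, List.getD_eq_getElem?_getD]
  have : orderC cnt = (PySem.List.sorted (PySem.Set.ofList cnt) (fun c => c)).flatMap
      (fun c => (NTab cnt).filter (fun p => p.2 == c)) := by
    unfold orderC
    rw [List.flatMap_def, List.flatMap_def, List.map_congr_left (fun c _ => hblock c)]
  rw [this]
  apply partition_perm
  · exact (PySem.List.sorted_ofList_pairwise_lt cnt).imp (fun h => ne_of_lt h)
  · intro p hp
    rw [NTab] at hp
    obtain ⟨i, hi, rfl⟩ := List.mem_map.mp hp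
    have hi' : i < 101 := List.mem_range.mp hi
    rw [PySem.List.mem_sorted, PySem.Set.mem_ofList]
    rw [List.getD_eq_getElem _ _ (by omega)]
    exact List.getElem_mem _

lemma orderC_pairwise (cnt : List Int) :
    (orderC cnt).Pairwise (fun a b => keyLex a < keyLex b) := by
  unfold orderC
  have haux : ∀ cs : List Int, cs.Pairwise (· < ·) →
      (cs.flatMap (fun c => ((List.range 101).filter (fun (i : Nat) => cnt.getD i 0 == c)).map
        (fun (i : Nat) => ((i : Int), c)))).Pairwise (fun a b => keyLex a < keyLex b) := by
    intro cs
    induction cs with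
    | nil => intro _; simp
    | cons c cs ih =>
        intro hpw
        obtain ⟨hhead, htail⟩ := List.pairwise_cons.mp hpw
        rw [List.flatMap_cons]
        rw [List.pairwise_append]
        refine ⟨?_, ih htail, ?_⟩
        · rw [List.pairwise_map]
          refine (List.pairwise_lt_range.filter _).imp ?_
          intro i j hij
          simp [keyLex, Prod.Lex.toLex_lt_toLex]
          exact_mod_cast hij
        · intro a ha b hb
          obtain ⟨i, _, rfl⟩ := List.mem_map.mp ha
          obtain ⟨c', hc', hb'⟩ := List.mem_flatMap.mp hb
          obtain ⟨j, _, rfl⟩ := List.mem_map.mp hb'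
          simp only [keyLex, Prod.Lex.toLex_lt_toLex]
          exact Or.inl (hhead c' hc')
  exact haux _ (PySem.List.sorted_ofList_pairwise_lt cnt)

lemma sorted2_eq_sorted_lex (xs : List (Int × Int)) :
    PySem.List.sorted2 xs (fun x => x.2) (fun x => x.1) = PySem.List.sorted xs keyLex := by
  have hfun : (fun (a b : Int × Int) => (decide (a.2 < b.2) || (!decide (b.2 < a.2) && decide (a.1 < b.1))))
      = (fun (a b : Int × Int) => decide (keyLex a < keyLex b)) := by
    funext a b
    by_cases h1 : a.2 < b.2 <;> by_cases h2 : b.2 < a.2 <;> by_cases h3 : a.1 < b.1 <;>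
      simp [keyLex, Prod.Lex.toLex_lt_toLex, h1, h2, h3] <;> omega
  simp only [PySem.List.sorted2, PySem.List.sorted, if_neg (by decide : ¬ (false = true))]
  rw [hfun]

lemma sorted_eq_orderC (cnt : List Int) (hl : cnt.length = 101) :
    PySem.List.sorted2 (NTab cnt) (fun x => x.2) (fun x => x.1) = orderC cnt := by
  rw [sorted2_eq_sorted_lex]
  exact PySem.List.sorted_eq_of_perm_of_pairwise_lt _ _ _ (orderC_perm cnt hl) (orderC_pairwise cnt)

lemma orderC_len (cnt : List Int) (hl : cnt.length = 101) : (orderC cnt).length = 101 := by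
  rw [(orderC_perm cnt hl).length_eq]; simp [NTab]

lemma cntArr_len (lis : List Int) : (cntArr lis).length = 101 := by
  simp [cntArr, foldl_bCount_len]

lemma bCount_getD (c : List Int) (hl : c.length = 101) (v : Int) (h0 : -101 ≤ v) (h1 : v ≤ 100)
    (i : Nat) (hi : i < 101) :
    (bCount c v).getD i 0
      = c.getD i 0 + (if v ≠ 0 ∧ (if v < 0 then v + 101 else v) = (i : Int) then 1 else 0) := by
  by_cases hv : v = 0
  · simp [bCount, hv]
  · unfold bCount
    rw [if_pos hv, pyGetD_in c hl v h0 h1, pySetD_in c hl v h0 h1]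
    by_cases hiv : idx101 v = i
    · have hw : (if v < 0 then v + 101 else v) = (i : Int) := by
        unfold idx101 at hiv; split at hiv <;> split <;> omega
      rw [if_pos ⟨hv, hw⟩, hiv]
      have hlt : i < (c.set i (c.getD i 0 + 1)).length := by simp [hl]; omega
      rw [List.getD_eq_getElem _ _ hlt, List.getElem_set, if_pos rfl]
    · have hw : ¬ (v ≠ 0 ∧ (if v < 0 then v + 101 else v) = (i : Int)) := by
        rintro ⟨-, hw⟩
        exact hiv (by unfold idx101; split at hw <;> split <;> omega)
      rw [if_neg hw]
      have hlt : i < (c.set (idx101 v) (c.getD (idx101 v) 0 + 1)).length := by simp [hl]; omega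
      rw [List.getD_eq_getElem _ _ hlt, List.getElem_set, if_neg hiv]
      simp only [List.getD_eq_getElem?_getD]
      rw [List.getElem?_eq_getElem (by simp [hl]; omega)]
      simp

lemma foldl_bCount_getD (lis : List Int) (hpre : Pre_sortF lis) :
    ∀ c : List Int, c.length = 101 → ∀ i : Nat, i < 101 →
      (lis.foldl bCount c).getD i 0 = c.getD i 0 + ((wys lis).count (i : Int) : Int) := by
  induction lis with
  | nil => intro c _ i _; simp [wys]
  | cons v t ih =>
      intro c hc i hi
      have hv := hpre v (by simp)
      rw [List.foldl_cons,
          ih (fun w hw => hpre w (by simp [hw])) (bCount c v) (by rw [bCount_len, hc]) i hi,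
          bCount_getD c hc v hv.1 hv.2 i hi]
      by_cases hv0 : v = 0
      · simp [wys, hv0]
      · rw [show wys (v :: t) = (if v < 0 then v + 101 else v) :: wys t from by
              simp [wys, hv0],
            List.count_cons]
        by_cases hvi : (if v < 0 then v + 101 else v) = (i : Int)
        · rw [if_pos ⟨hv0, hvi⟩]
          simp [hvi]
          ring
        · rw [if_neg (by tauto)]
          simp [hvi]

lemma cntArr_getD (lis : List Int) (hpre : Pre_sortF lis) (i : Nat) (hi : i < 101) :
    (cntArr lis).getD i 0 = ((wys lis).count (i : Int) : Int) := by
  have := foldl_bCount_getD lis hpre (List.replicate 101 0) (by simp) i hi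
  rw [cntArr, this, List.getD_eq_getElem _ _ (by simpa using hi), List.getElem_replicate]
  ring

lemma mem_cntArr (lis : List Int) (hpre : Pre_sortF lis) (a : Int) :
    a ∈ cntArr lis ↔ ∃ i : Nat, i < 101 ∧ ((wys lis).count (i : Int) : Int) = a := by
  constructor
  · intro ha
    obtain ⟨j, hj, he⟩ := List.mem_iff_getElem.mp ha
    have hj101 : j < 101 := by rw [cntArr_len] at hj; exact hj
    refine ⟨j, hj101, ?_⟩
    rw [← cntArr_getD lis hpre j hj101, List.getD_eq_getElem _ _ hj, he]
  · rintro ⟨i, hi, rfl⟩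
    rw [← cntArr_getD lis hpre i hi,
        List.getD_eq_getElem _ _ (by rw [cntArr_len]; omega)]
    exact List.getElem_mem _

lemma cntArr_nonneg (lis : List Int) (hpre : Pre_sortF lis) (a : Int) (ha : a ∈ cntArr lis) :
    0 ≤ a := by
  obtain ⟨i, _, rfl⟩ := (mem_cntArr lis hpre a).mp ha
  exact_mod_cast Int.natCast_nonneg _

lemma wys_mem_iff (lis : List Int) (hpre : Pre_sortF lis) (k : Nat) (hk : k < 101) :
    ((k : Nat) : Int) ∈ wys lis ↔ ∃ v ∈ lis, v ≠ 0 ∧ (v = (k : Int) ∨ v = (k : Int) - 101) := by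
  constructor
  · intro h
    obtain ⟨v, hv, he⟩ := List.mem_map.mp h
    have hvf := List.mem_filter.mp hv
    have hv0 : v ≠ 0 := by simpa using hvf.2
    have hb := hpre v hvf.1
    refine ⟨v, hvf.1, hv0, ?_⟩
    split at he <;> omega
  · rintro ⟨v, hv, hv0, hcase⟩
    have hb := hpre v hv
    refine List.mem_map.mpr ⟨v, List.mem_filter.mpr ⟨hv, by simpa using hv0⟩, ?_⟩
    split <;> omega

lemma D_iff (lis : List Int) (hpre : Pre_sortF lis) :
    D_sortF lis ↔ ∀ i : Nat, i < 101 → (cntArr lis).getD i 0 ≠ 0 := by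
  unfold D_sortF
  constructor
  · intro h i hi
    have hm := (wys_mem_iff lis hpre i hi).mpr (h i (List.mem_range.mpr hi))
    rw [cntArr_getD lis hpre i hi]
    have := List.count_pos_iff.mpr hm
    omega
  · intro h k hk
    have hk101 := List.mem_range.mp hk
    apply (wys_mem_iff lis hpre k hk101).mp
    apply List.count_pos_iff.mp
    have := h k hk101
    rw [cntArr_getD lis hpre k hk101] at this
    omega

lemma mem_csA_mem (lis : List Int) (c : Int) (hc : c ∈ csA lis) : c ∈ cntArr lis := by
  simpa only [csA, PySem.List.mem_sorted, PySem.Set.mem_ofList] using hc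

lemma csA_shape (lis : List Int) (hpre : Pre_sortF lis) (h0 : (0 : Int) ∈ cntArr lis) :
    csA lis = 0 :: (csA lis).tail ∧ ∀ c ∈ (csA lis).tail, 0 < c := by
  have hmem : (0 : Int) ∈ csA lis := by
    simp only [csA, PySem.List.mem_sorted, PySem.Set.mem_ofList]; exact h0
  have hpw : (csA lis).Pairwise (· < ·) := PySem.List.sorted_ofList_pairwise_lt (cntArr lis)
  rcases hcs : csA lis with _ | ⟨h, t⟩
  · rw [hcs] at hmem; exact absurd hmem (List.not_mem_nil)
  · rw [hcs] at hpw hmem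
    obtain ⟨hhead, -⟩ := List.pairwise_cons.mp hpw
    have hh0 : h = 0 := by
      rcases List.mem_cons.mp hmem with h' | h'
      · omega
      · have hlt := hhead 0 h'
        have hge : 0 ≤ h :=
          cntArr_nonneg lis hpre h (mem_csA_mem lis h (by rw [hcs]; simp))
        omega
    subst hh0
    exact ⟨rfl, fun c hc => hhead c hc⟩

lemma orderC_eq_flat (lis : List Int) :
    orderC (cntArr lis) = (csA lis).flatMap (blockP lis) := rfl

lemma filter_flatMap_dist {α β : Type} (l : List α) (g : α → List β) (p : β → Bool) :
    (l.flatMap g).filter p = l.flatMap (fun a => (g a).filter p) := by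
  induction l with
  | nil => rfl
  | cons a t ih => simp [List.flatMap_cons, List.filter_append, ih]

lemma flatMap_flatMap_assoc {α β γ : Type} (l : List α) (g : α → List β) (h : β → List γ) :
    (l.flatMap g).flatMap h = l.flatMap (fun a => (g a).flatMap h) := by
  induction l with
  | nil => rfl
  | cons a t ih => simp [List.flatMap_cons, ih]

lemma len_pairflat (l : List (Int × Int)) :
    (l.flatMap (fun row => [row.1, row.2])).length = 2 * l.length := by
  induction l with
  | nil => rfl
  | cons a t ih => simp [List.flatMap_cons, ih]; ring

-- A's value, in flatMap form
lemma sortF_eval (lis : List Int) (hpre : Pre_sortF lis) :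
    sortF lis = (((orderC (cntArr lis)).drop 1).filter (fun row => decide (row.2 ≠ 0))).flatMap
      (fun row : Int × Int => [row.1, row.2]) := by
  unfold sortF
  dsimp only
  rw [PySem.List.foldl_pyRange_zero_pyGetD' lis 0 aCount]
  rw [NTab_init, count_fold lis hpre _ (by simp)]
  rw [show lis.foldl bCount (List.replicate 101 (0 : Int)) = cntArr lis from rfl]
  have hl : (cntArr lis).length = 101 := cntArr_len lis
  rw [sorted_eq_orderC _ hl]
  have hlen : (orderC (cntArr lis)).length = 101 := orderC_len _ hl
  rw [show (PySem.List.pyRange 1 101) = PySem.List.pyRange 1 ((orderC (cntArr lis)).length : Int) by rw [hlen]; norm_num]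
  rw [PySem.List.foldl_pyRange_pyGetD' (orderC (cntArr lis)) (0, 0) aEmit [] (by norm_num)]
  rw [show (Int.toNat 1) = 1 from rfl]
  rw [show aEmit = (fun (acc : List Int) (row : Int × Int) =>
        if row.2 ≠ 0 then acc ++ [row.1, row.2] else acc) from by funext a r; rfl]
  rw [PySem.List.foldl_ite_eq_foldl_filter (p := fun row : Int × Int => row.2 ≠ 0)]
  rw [PySem.List.foldl_append_eq_flatMap (g := fun row : Int × Int => [row.1, row.2]), List.nil_append]

-- B's value, in flatMap form
lemma sortF_alt_eval (lis : List Int) :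
    sortF_alt lis = (csA lis).flatMap
      (fun c => if c ≠ 0 then (blockP lis c).flatMap (fun row : Int × Int => [row.1, row.2]) else []) := by
  unfold sortF_alt
  dsimp only
  rw [show lis.foldl bCount (List.replicate 101 (0 : Int)) = cntArr lis from rfl]
  have hbody : (fun (result : List Int) (c : Int) =>
      if c ≠ 0 then
        (PySem.List.pyRange 0 101).foldl
          (fun r v => if PySem.List.pyGetD (cntArr lis) v 0 == c then r ++ [v, c] else r) result
      else result)
      = (fun (result : List Int) (c : Int) =>
          result ++ (if c ≠ 0 then (blockP lis c).flatMap (fun row : Int × Int => [row.1, row.2]) else [])) := by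
    funext result c
    by_cases hc : c = 0
    · simp [hc]
    · rw [if_pos (by exact hc), if_pos (by exact hc)]
      rw [show (101 : Int) = ((101 : Nat) : Int) by norm_num, PySem.List.pyRange_zero_nat,
          List.foldl_map]
      simp only [PySem.List.pyGetD_natCast]
      rw [PySem.List.foldl_if_eq_foldl_filter
            (p := fun (i : Nat) => (cntArr lis).getD i 0 == c)
            (f := fun r (i : Nat) => r ++ [(i : Int), c])]
      rw [PySem.List.foldl_append_eq_flatMap (g := fun (i : Nat) => [(i : Int), c])]
      rw [blockP, blockF, List.flatMap_map]
  rw [hbody]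
  rw [PySem.List.foldl_append_eq_flatMap
        (g := fun c => if c ≠ 0 then (blockP lis c).flatMap (fun row : Int × Int => [row.1, row.2]) else [])]
  rw [List.nil_append]
  rfl

-- ===== VERDICT (by name: the statement is the Claim_ definition above) =====
theorem sortF_spec : Claim_unchanged_sortF := by
  intro lis _hdom hpre
  unfold Spec_sortF
  intro hnd
  rw [sortF_eval lis hpre, sortF_alt_eval lis]
  obtain ⟨i0, hi0, hz⟩ : ∃ i : Nat, i < 101 ∧ (cntArr lis).getD i 0 = 0 := by
    by_contra hc
    exact hnd ((D_iff lis hpre).mpr (fun i hi h0 => hc ⟨i, hi, h0⟩))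
  have h0mem : (0 : Int) ∈ cntArr lis := by
    rw [← hz, List.getD_eq_getElem _ _ (by rw [cntArr_len]; omega)]
    exact List.getElem_mem _
  obtain ⟨hcs, htail⟩ := csA_shape lis hpre h0mem
  rw [orderC_eq_flat lis, hcs, List.flatMap_cons, List.flatMap_cons]
  rw [if_neg (by simp), List.nil_append]
  have h0blk : i0 ∈ blockF lis 0 := by
    rw [blockF, List.mem_filter]
    exact ⟨List.mem_range.mpr hi0, by rw [hz]; rfl⟩
  have hne : blockP lis 0 ≠ [] := by
    rw [blockP]
    simp only [ne_eq, List.map_eq_nil_iff]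
    intro h; rw [h] at h0blk; exact absurd h0blk (List.not_mem_nil)
  rw [List.drop_append_of_le_length (by
    rcases List.exists_cons_of_ne_nil hne with ⟨a, t, h⟩; rw [h]; simp)]
  rw [List.filter_append]
  have hz0 : ((blockP lis 0).drop 1).filter (fun row => decide (row.2 ≠ 0)) = [] := by
    rw [blockP, ← List.map_drop, List.filter_map]
    simp
  rw [hz0, List.nil_append]
  rw [filter_flatMap_dist, flatMap_flatMap_assoc]
  rw [List.flatMap_def, List.flatMap_def]
  refine congrArg List.flatten (List.map_congr_left ?_)
  intro c hc
  have hcpos := htail c hc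
  rw [if_pos (by omega)]
  congr 1
  apply List.filter_eq_self.mpr
  intro row hrow
  rw [blockP] at hrow
  obtain ⟨i, -, rfl⟩ := List.mem_map.mp hrow
  simpa using (by omega : c ≠ 0)

set_option maxRecDepth 100000 in
set_option maxHeartbeats 2000000 in
theorem sortF_changed : Claim_changed_sortF := by
  unfold Claim_changed_sortF
  decide

theorem sortF_tight : Claim_exact_sortF := by
  intro lis _hdom hpre hd heq
  have hall := (D_iff lis hpre).mp hd
  rw [sortF_eval lis hpre, sortF_alt_eval lis] at heq
  have hfilt : ((orderC (cntArr lis)).drop 1).filter (fun row => decide (row.2 ≠ 0))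
      = (orderC (cntArr lis)).drop 1 := by
    apply List.filter_eq_self.mpr
    intro row hrow
    have hmem : row ∈ orderC (cntArr lis) := List.mem_of_mem_drop hrow
    have hN := ((orderC_perm (cntArr lis) (cntArr_len lis)).mem_iff).mp hmem
    rw [NTab] at hN
    obtain ⟨i, hi, rfl⟩ := List.mem_map.mp hN
    have := hall i (List.mem_range.mp hi)
    simpa using this
  have hB : (csA lis).flatMap
        (fun c => if c ≠ 0 then (blockP lis c).flatMap (fun row : Int × Int => [row.1, row.2]) else [])
      = (orderC (cntArr lis)).flatMap (fun row : Int × Int => [row.1, row.2]) := by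
    rw [orderC_eq_flat lis, flatMap_flatMap_assoc]
    rw [List.flatMap_def, List.flatMap_def]
    refine congrArg List.flatten (List.map_congr_left ?_)
    intro c hc
    obtain ⟨i, hi, hci⟩ := (mem_cntArr lis hpre c).mp (mem_csA_mem lis c hc)
    have hcne : c ≠ 0 := by
      rw [← hci, ← cntArr_getD lis hpre i hi]
      exact hall i hi
    rw [if_pos hcne]
  rw [hfilt, hB] at heq
  have hlen := congrArg List.length heq
  rw [len_pairflat, len_pairflat, List.length_drop, orderC_len _ (cntArr_len lis)] at hlen
  omega
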